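-- pv_equiv track=rewrite | github.com/GabrielGenkov/TelebidPro_exercise | segments.py | __calculate
-- ===== SOURCE A (Python) =====
-- def __calculate(arr, distance, length):
-- 	parts = []
-- 	for i in range(len(arr) - 1):
-- 		for j in range(i, len(arr)):
-- 			if(abs(arr[i] - arr[j]) == distance):
-- 				length -= distance
-- 				parts.append((arr[i], arr[j]))
-- 	return length, parts
-- ===== SOURCE B (Python) =====
-- def _merge(xs, ys):
--     # merge two ascending index lists into one ascending list
--     out = []
--     a = b = 0
--     while a < len(xs) and b < len(ys):
--         if xs[a] <= ys[b]:
--             out.append(xs[a]); a += 1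
--         else:
--             out.append(ys[b]); b += 1
--     out.extend(xs[a:])
--     out.extend(ys[b:])
--     return out
--
-- def __calculate(arr, distance, length):
--     if distance < 0:
--         return length, []
--     pos = {}
--     for j, v in enumerate(arr):
--         pos.setdefault(v, []).append(j)
--     parts = []
--     for i in range(len(arr) - 1):
--         v = arr[i]
--         if distance == 0:
--             js = [j for j in pos[v] if j >= i]
--         else:
--             lo = [j for j in pos.get(v - distance, []) if j >= i]
--             hi = [j for j in pos.get(v + distance, []) if j >= i]
--             js = _merge(lo, hi)
--         for j in js:
--             parts.append((v, arr[j]))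
--     return length - distance * len(parts), parts
-- ===== Notes on version B (the rewrite author's own statement) =====
-- stated objective: faster
-- what changed: A's O(n^2) all-pairs inner scan is replaced by a value->ascending-index-list dictionary built once; for each i only the two candidate partner values' index lists are filtered to j>=i and merged in index order, so the per-i scan of the whole array disappears.
import Mathlib
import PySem

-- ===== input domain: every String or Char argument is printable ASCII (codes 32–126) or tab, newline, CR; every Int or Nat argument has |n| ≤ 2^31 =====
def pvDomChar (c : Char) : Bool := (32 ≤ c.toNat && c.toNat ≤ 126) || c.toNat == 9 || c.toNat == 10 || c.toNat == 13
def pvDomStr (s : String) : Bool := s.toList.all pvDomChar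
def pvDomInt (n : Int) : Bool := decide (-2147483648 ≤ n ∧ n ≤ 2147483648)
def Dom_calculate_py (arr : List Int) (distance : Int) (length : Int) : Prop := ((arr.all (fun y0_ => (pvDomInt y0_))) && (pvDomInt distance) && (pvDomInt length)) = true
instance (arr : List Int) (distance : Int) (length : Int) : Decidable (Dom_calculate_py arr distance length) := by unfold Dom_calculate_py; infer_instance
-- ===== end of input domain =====

-- B replaces A's all-pairs inner scan by a positions dictionary (value → ascending index list)
-- built once, merging per i the candidate partner index lists; same return value on every input.

-- ===== PORT A =====
def calculate_py (arr : List Int) (distance : Int) (length : Int) : Int × (List (Int × Int)) :=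
  (PySem.List.pyRange 0 ((arr.length : Int) - 1) 1).foldl
    (fun st i =>
      (PySem.List.pyRange i (arr.length : Int) 1).foldl
        (fun st j =>
          if |PySem.List.pyGetD arr i 0 - PySem.List.pyGetD arr j 0| = distance then
            (st.1 - distance, st.2 ++ [(PySem.List.pyGetD arr i 0, PySem.List.pyGetD arr j 0)])
          else st) st)
    (length, [])

-- ===== PORT B =====
-- merge of two ascending index lists (port of Source B's _merge two-pointer loop)
def pvMerge : List Int → List Int → List Int
  | [], ys => ys
  | x :: xs, [] => x :: xs
  | x :: xs, y :: ys =>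
      if x ≤ y then x :: pvMerge xs (y :: ys) else y :: pvMerge (x :: xs) ys

def calculate_py_alt (arr : List Int) (distance : Int) (length : Int) : Int × (List (Int × Int)) :=
  if distance < 0 then (length, [])
  else
    let pos := (PySem.List.enumerate arr).foldl
      (fun d p => d.modify p.2 [] (fun l => l ++ [p.1])) PySem.Dict.empty
    let parts := (PySem.List.pyRange 0 ((arr.length : Int) - 1) 1).foldl
      (fun ps i =>
        let v := PySem.List.pyGetD arr i 0
        let js :=
          if distance = 0 then (pos.getD v []).filter (fun j => decide (i ≤ j))
          else pvMerge ((pos.getD (v - distance) []).filter (fun j => decide (i ≤ j)))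
                       ((pos.getD (v + distance) []).filter (fun j => decide (i ≤ j)))
        ps ++ js.map (fun j => (v, PySem.List.pyGetD arr j 0)))
      []
    (length - distance * (parts.length : Int), parts)

-- ===== PRECONDITION & SPEC =====
def Spec_calculate_py (arr : List Int) (distance : Int) (length : Int) (out : Int × (List (Int × Int))) : Prop := out = calculate_py_alt arr distance length
instance (arr : List Int) (distance : Int) (length : Int) (out : Int × (List (Int × Int))) : Decidable (Spec_calculate_py arr distance length out) := by unfold Spec_calculate_py; infer_instance

-- ===== CLAIM (what is proved, stated in full; the proofs are below) =====
def Claim_equal_calculate_py : Prop := ∀ (arr : List Int) (distance : Int) (length : Int), Dom_calculate_py arr distance length → Spec_calculate_py arr distance length (calculate_py arr distance length)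

-- ===== LEMMAS AND PROOFS =====

-- A's inner loop: subtract d and append on every match
theorem foldA_inner (d : Int) (C : Int → Prop) [DecidablePred C] (f : Int → Int × Int)
    (js : List Int) (st : Int × List (Int × Int)) :
    js.foldl (fun st j => if C j then (st.1 - d, st.2 ++ [f j]) else st) st
      = (st.1 - d * ((((js.filter (fun j => decide (C j))).map f).length : Nat) : Int),
         st.2 ++ (js.filter (fun j => decide (C j))).map f) := by
  induction js generalizing st with
  | nil => simp
  | cons j js ih =>
    by_cases h : C j
    · simp only [List.foldl_cons, if_pos h, ih, List.filter_cons, decide_eq_true h]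
      refine Prod.ext ?_ ?_
      · simp; ring
      · simp
    · simp [List.foldl_cons, h, ih]

-- A's outer loop over the per-i closed forms
theorem foldA_outer (d : Int) (g : Int → List (Int × Int)) (is : List Int) (st : Int × List (Int × Int)) :
    is.foldl (fun st i => (st.1 - d * (((g i).length : Nat) : Int), st.2 ++ g i)) st
      = (st.1 - d * ((is.flatMap g).length : Int), st.2 ++ is.flatMap g) := by
  induction is generalizing st with
  | nil => simp
  | cons i is ih =>
    simp only [List.foldl_cons, ih]
    refine Prod.ext ?_ ?_
    · simp; ring
    · simp

-- enumerate as a map over the index range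
theorem enum_shift (arr : List Int) (s : Int) :
    PySem.List.enumerate arr s
      = (PySem.List.pyRange s (s + (arr.length : Int))).map
          (fun j => (j, PySem.List.pyGetD arr (j - s) 0)) := by
  induction arr generalizing s with
  | nil => simp [PySem.List.enumerate_nil]
  | cons x xs ih =>
    rw [PySem.List.enumerate_cons, PySem.List.pyRange_one_cons (by simp), List.map_cons]
    refine congrArg₂ _ ?_ ?_
    · simp [PySem.List.pyGetD_zero_cons]
    · rw [ih (s+1)]
      have harm : s + 1 + (xs.length : Int) = s + ((x :: xs).length : Int) := by
        simp; omega
      rw [harm]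
      refine List.map_congr_left ?_
      intro j hj
      rw [PySem.List.mem_pyRange_one] at hj
      have h1 : 0 ≤ j - (s+1) := by omega
      have h2 : j - s = (j - (s+1)) + 1 := by omega
      refine congrArg _ ?_
      rw [h2]
      obtain ⟨k, hk⟩ := Int.eq_ofNat_of_zero_le h1
      rw [hk]
      have : ((k:Int) + 1) = ((k+1 : Nat) : Int) := by push_cast; ring
      rw [this, PySem.List.pyGetD_natCast, PySem.List.pyGetD_natCast]
      simp

theorem enum_zero (arr : List Int) :
    PySem.List.enumerate arr
      = (PySem.List.pyRange 0 (arr.length : Int)).map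
          (fun j => (j, PySem.List.pyGetD arr j 0)) := by
  have h := enum_shift arr 0
  simp only [zero_add, sub_zero] at h
  exact h

-- the positions dictionary: pos[v] = indices of v, in order
theorem pos_getD (arr : List Int) (v : Int) :
    (((PySem.List.enumerate arr).foldl
        (fun d p => d.modify p.2 [] (fun l => l ++ [p.1])) PySem.Dict.empty).getD v [])
      = ((PySem.List.enumerate arr).filter (fun p => p.2 == v)).map (·.1) := by
  have h : PySem.List.enumerate arr = ((PySem.List.enumerate arr).map Prod.swap).map Prod.swap := by
    simp
  conv_lhs => rw [h]
  rw [List.foldl_map]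
  have := PySem.Dict.getD_foldl_modify_append ((PySem.List.enumerate arr).map Prod.swap)
      (PySem.Dict.empty : PySem.Dict Int (List Int)) v
  simp only [Prod.fst_swap, Prod.snd_swap]
  rw [this]
  simp [List.filter_map, List.map_map, Function.comp_def]

-- the suffix of a range is a filter of the whole range
theorem range_filter_ge (n i : Int) (h0 : 0 ≤ i) (hn : i ≤ n) :
    (PySem.List.pyRange 0 n).filter (fun j => decide (i ≤ j)) = PySem.List.pyRange i n := by
  rw [PySem.List.pyRange_one_append 0 i n h0 hn, List.filter_append]
  rw [List.filter_eq_nil_iff.mpr, List.filter_eq_self.mpr, List.nil_append]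
  · intro j hj; rw [PySem.List.mem_pyRange_one] at hj; simp; omega
  · intro j hj; rw [PySem.List.mem_pyRange_one] at hj; simp; omega

theorem pvMerge_nil_right (A : List Int) : pvMerge A [] = A := by
  cases A <;> simp [pvMerge]

theorem pvMerge_cons_left (x : Int) (A B : List Int) (h : ∀ b ∈ B, x ≤ b) :
    pvMerge (x :: A) B = x :: pvMerge A B := by
  cases B with
  | nil => rw [pvMerge_nil_right, pvMerge_nil_right]
  | cons b B => simp [pvMerge, h b (by simp)]

theorem pvMerge_cons_right (y : Int) (A B : List Int) (h : ∀ a ∈ A, y < a) :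
    pvMerge A (y :: B) = y :: pvMerge A B := by
  cases A with
  | nil => simp [pvMerge]
  | cons a A =>
    have : ¬ a ≤ y := by have := h a (by simp); omega
    simp [pvMerge, this]

-- merging disjoint filters of a strictly fst-increasing list = filter of the disjunction
theorem pvMerge_filter (E : List (Int × Int)) (hE : E.Pairwise (fun p q => p.1 < q.1))
    (p q : Int × Int → Bool) (hpq : ∀ x, p x = true → q x = false) :
    pvMerge ((E.filter p).map (·.1)) ((E.filter q).map (·.1))
      = (E.filter (fun x => p x || q x)).map (·.1) := by
  induction E with
  | nil => simp [pvMerge]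
  | cons x E ih =>
    rw [List.pairwise_cons] at hE
    obtain ⟨hx, hE'⟩ := hE
    have hmemq : ∀ b ∈ ((E.filter q).map (·.1)), x.1 ≤ b := by
      intro b hb
      obtain ⟨y, hy, rfl⟩ := List.mem_map.mp hb
      exact le_of_lt (hx y (List.mem_of_mem_filter hy))
    have hmemp : ∀ b ∈ ((E.filter p).map (·.1)), x.1 < b := by
      intro b hb
      obtain ⟨y, hy, rfl⟩ := List.mem_map.mp hb
      exact hx y (List.mem_of_mem_filter hy)
    by_cases hp : p x = true
    · have hq : q x = false := hpq x hp
      simp only [List.filter_cons, hp, hq, Bool.true_or, if_true, Bool.false_eq_true, if_false,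
        List.map_cons]
      rw [pvMerge_cons_left x.1 _ _ hmemq, ih hE']
    · have hp' : p x = false := by simpa using hp
      by_cases hq : q x = true
      · simp only [List.filter_cons, hp', hq, Bool.false_or, if_true, Bool.false_eq_true, if_false,
          List.map_cons]
        rw [pvMerge_cons_right x.1 _ _ hmemp, ih hE']
      · have hq' : q x = false := by simpa using hq
        simp only [List.filter_cons, hp', hq', Bool.false_or, Bool.false_eq_true, if_false]
        exact ih hE'

theorem posFilter (arr : List Int) (w i : Int) :
    ((((PySem.List.enumerate arr).foldl
        (fun dd p => dd.modify p.2 [] (fun l => l ++ [p.1])) PySem.Dict.empty).getD w []).filter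
          (fun j => decide (i ≤ j)))
      = (((PySem.List.pyRange 0 (arr.length : Int)).map
            (fun j => (j, PySem.List.pyGetD arr j 0))).filter
          (fun x => x.2 == w && decide (i ≤ x.1))).map (·.1) := by
  rw [pos_getD, enum_zero, List.filter_map, List.filter_filter]
  exact congrArg _ (List.filter_congr (fun x _ => by simp [Function.comp, Bool.and_comm]))

theorem mapFstFilterMap (arr : List Int) (P : Int × Int → Bool) (Q : Int → Bool)
    (h : ∀ j, P (j, PySem.List.pyGetD arr j 0) = Q j) :
    ((((PySem.List.pyRange 0 (arr.length : Int)).map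
        (fun j => (j, PySem.List.pyGetD arr j 0))).filter P).map (·.1))
      = (PySem.List.pyRange 0 (arr.length : Int)).filter Q := by
  rw [List.filter_map, List.map_map]
  have : (((fun x : Int × Int => x.1) ∘ (fun j => (j, PySem.List.pyGetD arr j 0)))) = fun j : Int => j := rfl
  rw [this, List.map_id']
  exact List.filter_congr (fun j _ => h j)

-- B's per-i candidate list = A's per-i inner scan
theorem js_eq (arr : List Int) (d i : Int) (hd : 0 ≤ d) (h0 : 0 ≤ i) (hin : i ≤ (arr.length : Int)) :
    (if d = 0 then
        ((((PySem.List.enumerate arr).foldl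
            (fun dd p => dd.modify p.2 [] (fun l => l ++ [p.1])) PySem.Dict.empty).getD
              (PySem.List.pyGetD arr i 0) []).filter (fun j => decide (i ≤ j)))
      else
        pvMerge
          ((((PySem.List.enumerate arr).foldl
              (fun dd p => dd.modify p.2 [] (fun l => l ++ [p.1])) PySem.Dict.empty).getD
                (PySem.List.pyGetD arr i 0 - d) []).filter (fun j => decide (i ≤ j)))
          ((((PySem.List.enumerate arr).foldl
              (fun dd p => dd.modify p.2 [] (fun l => l ++ [p.1])) PySem.Dict.empty).getD
                (PySem.List.pyGetD arr i 0 + d) []).filter (fun j => decide (i ≤ j))))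
      = (PySem.List.pyRange i (arr.length : Int)).filter
          (fun j => decide (|PySem.List.pyGetD arr i 0 - PySem.List.pyGetD arr j 0| = d)) := by
  have hE : (((PySem.List.pyRange 0 (arr.length : Int)).map
      (fun j => (j, PySem.List.pyGetD arr j 0))).Pairwise (fun p q => p.1 < q.1)) :=
    List.pairwise_map.mpr (PySem.List.pairwise_lt_pyRange_one 0 _)
  rw [← range_filter_ge (arr.length : Int) i h0 hin, List.filter_filter]
  by_cases h0d : d = 0
  · subst h0d
    rw [if_pos rfl, posFilter]
    refine mapFstFilterMap arr _ _ (fun j => ?_)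
    apply Bool.eq_iff_iff.mpr
    simp only [Bool.and_eq_true, beq_iff_eq, decide_eq_true_eq, abs_eq_zero, sub_eq_zero]
    constructor
    · rintro ⟨h1, h2⟩; exact ⟨by omega, h2⟩
    · rintro ⟨h1, h2⟩; exact ⟨by omega, h2⟩
  · rw [if_neg h0d, posFilter, posFilter,
      pvMerge_filter _ hE _ _ (fun x hx => by
        simp only [Bool.and_eq_true, beq_iff_eq, decide_eq_true_eq] at hx
        rw [Bool.eq_false_iff]
        intro hq
        simp only [Bool.and_eq_true, beq_iff_eq, decide_eq_true_eq] at hq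
        omega)]
    refine mapFstFilterMap arr _ _ (fun j => ?_)
    apply Bool.eq_iff_iff.mpr
    simp only [Bool.or_eq_true, Bool.and_eq_true, beq_iff_eq, decide_eq_true_eq]
    rw [abs_eq hd]
    constructor
    · rintro (⟨h1, h2⟩ | ⟨h1, h2⟩) <;> exact ⟨by omega, h2⟩
    · rintro ⟨h1 | h1, h2⟩
      · left; exact ⟨by omega, h2⟩
      · right; exact ⟨by omega, h2⟩

theorem pair_of_flat (l d : Int) (R : List Int) (g h : Int → List (Int × Int))
    (hgh : ∀ i ∈ R, g i = h i) :
    (l - d * ((R.flatMap g).length : Int), ([] : List (Int × Int)) ++ R.flatMap g)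
      = (l - d * ((R.flatMap h).length : Int), ([] : List (Int × Int)) ++ R.flatMap h) := by
  have hfl : R.flatMap g = R.flatMap h := by
    rw [List.flatMap_def, List.flatMap_def]
    exact congrArg List.flatten (List.map_congr_left hgh)
  rw [hfl]

-- ===== VERDICT (by name: the statement is the Claim_ definition above) =====
theorem calculate_py_spec : Claim_equal_calculate_py := by
  intro arr d l _
  unfold Spec_calculate_py
  by_cases hd : d < 0
  · have hf : ∀ (i : Int) (js : List Int),
        js.filter (fun j => decide (|PySem.List.pyGetD arr i 0 - PySem.List.pyGetD arr j 0| = d)) = [] := by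
      intro i js
      refine List.filter_eq_nil_iff.mpr (fun j _ => ?_)
      simp only [decide_eq_true_eq]
      intro h
      have := abs_nonneg (PySem.List.pyGetD arr i 0 - PySem.List.pyGetD arr j 0)
      omega
    simp only [calculate_py, calculate_py_alt, if_pos hd, foldA_inner, hf, List.map_nil,
      List.length_nil, Nat.cast_zero, mul_zero, sub_zero, List.append_nil, Prod.mk.eta]
    rw [List.foldl_fixed]
  · have hd' : 0 ≤ d := by omega
    simp only [calculate_py, calculate_py_alt, if_neg hd, foldA_inner]
    rw [foldA_outer, PySem.List.foldl_append_eq_flatMap]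
    refine pair_of_flat l d _ _ _ (fun i hi => ?_)
    rw [PySem.List.mem_pyRange_one] at hi
    exact (congrArg (List.map _) (js_eq arr d i hd' hi.1 (by omega))).symm
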